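-- pv_equiv track=rewrite | github.com/hghyhghy/Codechef-Coding-Ninja | Desktop/DSA/T80/searchinarray.py | sum_less_and_queries
-- ===== SOURCE A (Python) =====
-- def sum_less_and_queries(array:list[int],queary:list[int])->int:
--
--     result=[]
--
--     for q in queary:
--         current = 0
--
--         for num in array:
--
--             if num <= q:
--
--                 current += num
--
--         result.append(current)
--
--
--     return result
-- ===== SOURCE B (Python) =====
-- def sum_less_and_queries(array: list[int], queary: list[int]) -> int:
--     s = sorted(array)
--     prefix = [0]
--     total = 0
--     for v in s:
--         total += v
--         prefix.append(total)
--     result = []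
--     for q in queary:
--         lo, hi = 0, len(s)
--         while lo < hi:
--             mid = (lo + hi) // 2
--             if s[mid] <= q:
--                 lo = mid + 1
--             else:
--                 hi = mid
--         result.append(prefix[lo])
--     return result
-- ===== Notes on version B (the rewrite author's own statement) =====
-- stated objective: faster
-- what changed: B sorts the array once, builds a prefix-sum list, and answers each query with a hand-written binary search instead of A's full rescan of the array per query.
import Mathlib
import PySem

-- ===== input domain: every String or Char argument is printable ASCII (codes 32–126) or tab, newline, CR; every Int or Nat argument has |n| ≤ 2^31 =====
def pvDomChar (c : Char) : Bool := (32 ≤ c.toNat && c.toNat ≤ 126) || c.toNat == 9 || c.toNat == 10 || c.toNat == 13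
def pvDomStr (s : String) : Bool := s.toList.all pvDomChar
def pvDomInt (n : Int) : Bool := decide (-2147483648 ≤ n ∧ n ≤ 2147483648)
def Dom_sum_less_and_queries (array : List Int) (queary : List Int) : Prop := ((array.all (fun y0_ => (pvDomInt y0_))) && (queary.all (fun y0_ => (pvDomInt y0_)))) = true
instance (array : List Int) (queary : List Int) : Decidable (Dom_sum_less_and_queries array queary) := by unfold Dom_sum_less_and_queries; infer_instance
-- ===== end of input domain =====

-- B replaces A's per-query rescan of the whole array by sort + prefix sums + binary search (objective: faster, asymptotic).

-- ===== PORT A =====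
-- A: for each query, scan the whole array and add every element ≤ q.
def sum_less_and_queries (array : List Int) (queary : List Int) : List Int :=
  queary.foldl (fun result q =>
    result ++ [array.foldl (fun current num => if num ≤ q then current + num else current) 0]) []

-- ===== PORT B =====
-- Source B's hand-written binary search (while lo < hi). s[mid] is always in range here
-- (0 ≤ lo ≤ mid < hi ≤ len s), so List.getD is exact for Python's s[mid].
def pvBisect (s : List Int) (q : Int) (lo hi : Nat) : Nat :=
  if lo < hi then
    let mid := (lo + hi) / 2
    if s.getD mid 0 ≤ q then pvBisect s q (mid + 1) hi
    else pvBisect s q lo mid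
  else lo
termination_by hi - lo
decreasing_by all_goals omega

-- B: sort once, build the prefix-sum list once, answer each query by binary search.
-- prefix[lo] is always in range (lo ≤ len s < len prefix), so List.getD is exact.
def sum_less_and_queries_alt (array : List Int) (queary : List Int) : List Int :=
  let s := PySem.List.sorted array (fun x => x) false
  let pt := s.foldl (fun acc v => (acc.1 ++ [acc.2 + v], acc.2 + v)) ([(0 : Int)], (0 : Int))
  queary.foldl (fun result q => result ++ [pt.1.getD (pvBisect s q 0 s.length) 0]) []

-- ===== PRECONDITION & SPEC =====
def Spec_sum_less_and_queries (array : List Int) (queary : List Int) (out : List Int) : Prop := out = sum_less_and_queries_alt array queary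
instance (array : List Int) (queary : List Int) (out : List Int) : Decidable (Spec_sum_less_and_queries array queary out) := by unfold Spec_sum_less_and_queries; infer_instance

-- ===== CLAIM (what is proved, stated in full; the proofs are below) =====
def Claim_equal_sum_less_and_queries : Prop := ∀ (array : List Int) (queary : List Int), Dom_sum_less_and_queries array queary → Spec_sum_less_and_queries array queary (sum_less_and_queries array queary)

-- ===== LEMMAS AND PROOFS =====

-- A's inner loop sums the elements ≤ q.
lemma pv_foldl_if_sum (q : Int) : ∀ (l : List Int) (a : Int),
    l.foldl (fun current num => if num ≤ q then current + num else current) a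
      = a + (l.filter (fun n => n ≤ q)).sum := by
  intro l
  induction l with
  | nil => intro a; simp
  | cons v t ih =>
    intro a
    by_cases h : v ≤ q <;> simp [h, ih, add_assoc]

-- the partial sums Source B's prefix loop appends
def pvPartials : List Int → Int → List Int
  | [], _ => []
  | v :: l, t => (t + v) :: pvPartials l (t + v)

lemma pv_prefix_fold : ∀ (l : List Int) (p : List Int) (t : Int),
    l.foldl (fun acc v => (acc.1 ++ [acc.2 + v], acc.2 + v)) (p, t)
      = (p ++ pvPartials l t, t + l.sum) := by
  intro l
  induction l with
  | nil => intro p t; simp [pvPartials]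
  | cons v tl ih =>
    intro p t
    simp [pvPartials, List.foldl_cons, ih, List.append_assoc]
    ring

lemma pv_partials_getD : ∀ (l : List Int) (t : Int) (k : Nat), k ≤ l.length →
    ((t :: pvPartials l t).getD k 0) = t + (l.take k).sum := by
  intro l
  induction l with
  | nil =>
    intro t k hk
    simp only [List.length_nil, Nat.le_zero] at hk
    subst hk
    simp [pvPartials]
  | cons v tl ih =>
    intro t k hk
    cases k with
    | zero => simp
    | succ k =>
      have := ih (t + v) k (by simpa using hk)
      simpa [pvPartials, add_assoc] using this

lemma pvBisect_spec (s : List Int) (q : Int) (hs : s.Pairwise (· ≤ ·)) :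
    ∀ (n lo hi : Nat), hi - lo ≤ n → lo ≤ hi → hi ≤ s.length →
    (∀ j (hj : j < s.length), j < lo → s[j] ≤ q) →
    (∀ j (hj : j < s.length), hi ≤ j → q < s[j]) →
    lo ≤ pvBisect s q lo hi ∧ pvBisect s q lo hi ≤ hi ∧
    (∀ j (hj : j < s.length), j < pvBisect s q lo hi → s[j] ≤ q) ∧
    (∀ j (hj : j < s.length), pvBisect s q lo hi ≤ j → q < s[j]) := by
  have hmono : ∀ i j (hi : i < s.length) (hj : j < s.length), i ≤ j → s[i] ≤ s[j] := by
    intro i j hi hj hij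
    rcases Nat.lt_or_ge i j with h | h
    · exact (List.pairwise_iff_getElem.mp hs) i j hi hj h
    · have : i = j := le_antisymm hij h
      subst this; exact le_refl _
  intro n
  induction n with
  | zero =>
    intro lo hi hn hlh hhl hlo hhi
    have heq : lo = hi := by omega
    subst heq
    rw [pvBisect]
    simp only [lt_irrefl, if_false]
    exact ⟨le_refl _, le_refl _, hlo, hhi⟩
  | succ n ih =>
    intro lo hi hn hlh hhl hlo hhi
    by_cases hlt : lo < hi
    · rw [pvBisect]
      simp only [hlt, if_true]
      have hmid1 : lo ≤ (lo + hi) / 2 := by omega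
      have hmid2 : (lo + hi) / 2 < hi := by omega
      have hmlen : (lo + hi) / 2 < s.length := by omega
      have hget : s.getD ((lo + hi) / 2) 0 = s[(lo + hi) / 2] := List.getD_eq_getElem s 0 hmlen
      by_cases hc : s.getD ((lo + hi) / 2) 0 ≤ q
      · simp only [hc, if_true]
        have hlo' : ∀ j (hj : j < s.length), j < (lo + hi) / 2 + 1 → s[j] ≤ q := by
          intro j hj hjlt
          rcases Nat.lt_or_ge j lo with h | h
          · exact hlo j hj h
          · calc s[j] ≤ s[(lo + hi) / 2] := hmono j _ hj hmlen (by omega)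
              _ ≤ q := by rwa [hget] at hc
        obtain ⟨a1, a2, a3, a4⟩ := ih ((lo + hi) / 2 + 1) hi (by omega) (by omega) hhl hlo' hhi
        exact ⟨by omega, a2, a3, a4⟩
      · simp only [hc, if_false]
        have hhi' : ∀ j (hj : j < s.length), (lo + hi) / 2 ≤ j → q < s[j] := by
          intro j hj hge
          have hq : q < s[(lo + hi) / 2] := by rw [← hget]; omega
          calc q < s[(lo + hi) / 2] := hq
            _ ≤ s[j] := hmono _ j hmlen hj hge
        obtain ⟨a1, a2, a3, a4⟩ := ih lo ((lo + hi) / 2) (by omega) (by omega) (by omega) hlo hhi'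
        exact ⟨a1, by omega, a3, a4⟩
    · have heq : lo = hi := by omega
      subst heq
      rw [pvBisect]
      simp only [lt_irrefl, if_false]
      exact ⟨le_refl _, le_refl _, hlo, hhi⟩

lemma pv_filter_eq_take (p : Int → Bool) : ∀ (s : List Int) (r : Nat), r ≤ s.length →
    (∀ j (hj : j < s.length), j < r → p s[j]) →
    (∀ j (hj : j < s.length), r ≤ j → ¬ p s[j]) →
    s.filter p = s.take r := by
  intro s
  induction s with
  | nil => intro r hr _ _; simp at hr; simp [hr]
  | cons v t ih =>
    intro r hr h1 h2
    cases r with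
    | zero =>
      simp only [List.take_zero]
      rw [List.filter_eq_nil_iff]
      intro a ha
      rcases List.mem_iff_getElem.mp ha with ⟨j, hj, rfl⟩
      exact h2 j hj (Nat.zero_le _)
    | succ r =>
      have hv : p v := h1 0 (by simp) (by omega)
      have ht : t.filter p = t.take r := by
        apply ih r (by simpa using hr)
        · intro j hj hjr
          have := h1 (j + 1) (by simpa using Nat.succ_lt_succ hj) (by omega)
          simpa using this
        · intro j hj hjr
          have := h2 (j + 1) (by simpa using Nat.succ_lt_succ hj) (by omega)
          simpa using this
      simp [hv, ht]

-- per-query agreement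
lemma pv_query_eq (array s : List Int) (q : Int)
    (hsdef : s = PySem.List.sorted array (fun x => x) false) :
    array.foldl (fun current num => if num ≤ q then current + num else current) 0
      = ((0 : Int) :: pvPartials s 0).getD (pvBisect s q 0 s.length) 0 := by
  subst hsdef
  set s := PySem.List.sorted array (fun x => x) false with hsdef
  have hperm : s.Perm array := PySem.List.sorted_perm array (fun x => x) false
  have hpw : s.Pairwise (· ≤ ·) := by
    simpa using PySem.List.sorted_pairwise array (fun x => x)
  obtain ⟨h0, hlen, hle, hgt⟩ :=
    pvBisect_spec s q hpw (s.length) 0 s.length (by omega) (by omega) (le_refl _)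
      (fun j hj h => by omega) (fun j hj h => by omega)
  have htake : s.filter (fun n => n ≤ q) = s.take (pvBisect s q 0 s.length) := by
    apply pv_filter_eq_take _ s _ hlen
    · intro j hj hjr; simpa using hle j hj hjr
    · intro j hj hjr; simpa using hgt j hj hjr
  rw [pv_foldl_if_sum q array 0, zero_add]
  have hsum : (array.filter (fun n => n ≤ q)).sum = (s.filter (fun n => n ≤ q)).sum :=
    (List.Perm.sum_eq (List.Perm.filter _ hperm)).symm
  rw [hsum, htake, pv_partials_getD s 0 _ hlen, zero_add]

-- ===== VERDICT (by name: the statement is the Claim_ definition above) =====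
theorem sum_less_and_queries_spec : Claim_equal_sum_less_and_queries := by
  intro array queary _
  unfold Spec_sum_less_and_queries sum_less_and_queries sum_less_and_queries_alt
  simp only []
  rw [pv_prefix_fold]
  rw [PySem.List.foldl_append_singleton_eq_map, PySem.List.foldl_append_singleton_eq_map]
  apply List.map_congr_left
  intro q hq
  simpa using pv_query_eq array _ q rfl
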